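-- pv_equiv track=rewrite | github.com/not-aimmee/mathlens | math_recognizer.py | build_expr
-- ===== SOURCE A (Python) =====
-- OPERATORS   = {"+", "-", "*", "/", "**"}
--
-- OP_MAP      = {"x":"*", "^":"**"}
--
-- def build_expr(preds):
--     tokens = [OP_MAP.get(lbl,lbl) for lbl,_ in preds]
--     parts  = []; i=0
--     while i < len(tokens):
--         t = tokens[i]
--         if t.isdigit():
--             num=t
--             while i+1<len(tokens) and tokens[i+1].isdigit():
--                 i+=1; num+=tokens[i]
--             parts.append(num)
--         elif t=="=":
--             pass
--         else:
--             parts.append(t)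
--         i+=1
--
--     while parts and parts[0]  in OPERATORS: parts.pop(0)
--     while parts and parts[-1] in OPERATORS: parts.pop()
--     return " ".join(parts)
-- ===== SOURCE B (Python) =====
-- OPERATORS = {"+", "-", "*", "/", "**"}
--
-- OP_MAP = {"x": "*", "^": "**"}
--
--
-- def _runs(tokens):
--     """Split tokens into maximal runs of equal str.isdigit key: [(key, run), ...]."""
--     if not tokens:
--         return []
--     k = tokens[0].isdigit()
--     i = 1
--     while i < len(tokens) and tokens[i].isdigit() == k:
--         i += 1
--     return [(k, tokens[:i])] + _runs(tokens[i:])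
--
--
-- def build_expr(preds):
--     tokens = [OP_MAP.get(lbl, lbl) for lbl, _ in preds]
--     parts = []
--     for is_num, run in _runs(tokens):
--         if is_num:
--             parts.append("".join(run))
--         else:
--             parts.extend(t for t in run if t != "=")
--     i = 0
--     while i < len(parts) and parts[i] in OPERATORS:
--         i += 1
--     parts = parts[i:]
--     j = len(parts)
--     while j > 0 and parts[j - 1] in OPERATORS:
--         j -= 1
--     return " ".join(parts[:j])
-- ===== Notes on version B (the rewrite author's own statement) =====
-- stated objective: alternative
-- what changed: A's manual index walk with a nested digit-collecting while and in-place pops is replaced by partitioning the token stream into maximal isdigit-runs and flat-mapping over the runs (join digit runs, filter '=' from the rest), with the operator trimming done by index/slice instead of repeated pop.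
import Mathlib
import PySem

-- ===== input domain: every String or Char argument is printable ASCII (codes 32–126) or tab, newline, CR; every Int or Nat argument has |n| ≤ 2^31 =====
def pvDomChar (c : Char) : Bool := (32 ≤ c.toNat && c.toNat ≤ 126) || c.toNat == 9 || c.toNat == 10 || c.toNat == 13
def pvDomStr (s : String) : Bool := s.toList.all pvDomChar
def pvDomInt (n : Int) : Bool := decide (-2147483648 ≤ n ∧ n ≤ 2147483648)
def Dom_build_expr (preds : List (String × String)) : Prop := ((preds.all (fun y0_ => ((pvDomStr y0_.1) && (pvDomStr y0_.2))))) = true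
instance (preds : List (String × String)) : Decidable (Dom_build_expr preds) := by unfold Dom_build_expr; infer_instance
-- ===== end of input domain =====

-- B replaces A's manual index scan (nested digit-collecting while, in-place pops) by
-- partitioning the tokens into maximal isdigit-runs and flat-mapping over the runs;
-- same result, same cost (objective: alternative).


-- shared module constants: OP_MAP.get and membership in OPERATORS
def pvOpMap (s : String) : String :=
  if s == "x" then "*" else if s == "^" then "**" else s

def pvIsOp (s : String) : Bool :=
  s == "+" || s == "-" || s == "*" || s == "/" || s == "**"

-- ===== PORT A =====
-- the inner `while i+1<len(tokens) and tokens[i+1].isdigit(): num+=tokens[i]`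
def pvCollect : String → List String → String × List String
  | num, [] => (num, [])
  | num, t :: rest =>
    if PySem.Str.strIsdigit t then pvCollect (num ++ t) rest else (num, t :: rest)

theorem pvCollect_len (num : String) (ts : List String) :
    (pvCollect num ts).2.length ≤ ts.length := by
  induction ts generalizing num with
  | nil => simp [pvCollect]
  | cons t rest ih =>
    simp only [pvCollect]
    split
    · exact Nat.le_trans (ih _) (Nat.le_succ _)
    · simp

-- the outer `while i < len(tokens)` loop building `parts`
def pvPartsA : List String → List String
  | [] => []
  | t :: rest =>
    if PySem.Str.strIsdigit t then
      let p := pvCollect t rest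
      p.1 :: pvPartsA p.2
    else if t == "=" then pvPartsA rest
    else t :: pvPartsA rest
termination_by ts => ts.length
decreasing_by
  · have := pvCollect_len t rest
    simp only [List.length_cons]
    omega
  · simp
  · simp

-- `while parts and parts[0] in OPERATORS: parts.pop(0)`
def pvPopLead : List String → List String
  | [] => []
  | t :: rest => if pvIsOp t then pvPopLead rest else t :: rest

-- `while parts and parts[-1] in OPERATORS: parts.pop()`
def pvPopTrail (ps : List String) : List String :=
  match h : ps.getLast? with
  | some t => if pvIsOp t then pvPopTrail ps.dropLast else ps
  | none => ps
termination_by ps.length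
decreasing_by
  have hne : ps ≠ [] := by intro hnil; subst hnil; simp at h
  have : 0 < ps.length := List.length_pos_iff.mpr hne
  simp [List.length_dropLast]; omega

def build_expr (preds : List (String × String)) : String :=
  PySem.Str.join " " (pvPopTrail (pvPopLead (pvPartsA (preds.map (fun p => pvOpMap p.1)))))

-- ===== PORT B =====
-- _runs: maximal runs of equal str.isdigit key
def pvRuns : List String → List (Bool × List String)
  | [] => []
  | t :: rest =>
    let k := PySem.Str.strIsdigit t
    (k, t :: rest.takeWhile (fun u => PySem.Str.strIsdigit u == k)) ::
      pvRuns (rest.dropWhile (fun u => PySem.Str.strIsdigit u == k))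
termination_by ts => ts.length
decreasing_by
  simp only [List.length_cons]
  exact Nat.lt_succ_of_le (List.length_dropWhile_le _ _)

def build_expr_alt (preds : List (String × String)) : String :=
  -- parts: flat-map over the isdigit-runs (join a digit run, drop '=' elsewhere);
  -- then advance i past leading operators (suffix), retreat j past trailing ones (prefix)
  PySem.Str.join " "
    (((((pvRuns (preds.map (fun p => pvOpMap p.1))).flatMap
        (fun r => if r.1 then [PySem.Str.join "" r.2] else r.2.filter (fun t => t != "="))
      ).dropWhile pvIsOp).reverse.dropWhile pvIsOp).reverse)

-- ===== PRECONDITION & SPEC =====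
def Spec_build_expr (preds : List (String × String)) (out : String) : Prop := out = build_expr_alt preds
instance (preds : List (String × String)) (out : String) : Decidable (Spec_build_expr preds out) := by unfold Spec_build_expr; infer_instance

-- ===== CLAIM (what is proved, stated in full; the proofs are below) =====
def Claim_equal_build_expr : Prop := ∀ (preds : List (String × String)), Dom_build_expr preds → Spec_build_expr preds (build_expr preds)

-- ===== LEMMAS AND PROOFS =====
theorem pvStrEq_of_toList {s t : String} (h : s.toList = t.toList) : s = t := by
  have := congrArg String.ofList h
  simpa [String.ofList_toList] using this

theorem pvJoinE_nil_append (num : String) : num ++ PySem.Str.join "" [] = num := by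
  apply pvStrEq_of_toList
  simp [PySem.Str.toList_join, PySem.Chars.join_nil]

-- "".join (a :: l) = a ++ "".join l
theorem pvJoinE_cons (a : String) (l : List String) :
    PySem.Str.join "" (a :: l) = a ++ PySem.Str.join "" l := by
  apply pvStrEq_of_toList
  cases l with
  | nil =>
    simp [PySem.Str.toList_join, PySem.Chars.join_singleton, PySem.Chars.join_nil]
  | cons b rest =>
    simp [PySem.Str.toList_join, PySem.Chars.join_cons_cons, String.toList_append]

theorem pvCollect_eq (num : String) (ts : List String) :
    pvCollect num ts =
      (num ++ PySem.Str.join "" (ts.takeWhile PySem.Str.strIsdigit),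
       ts.dropWhile PySem.Str.strIsdigit) := by
  induction ts generalizing num with
  | nil =>
    rw [pvCollect, List.takeWhile_nil, List.dropWhile_nil, pvJoinE_nil_append]
  | cons t rest ih =>
    by_cases hd : PySem.Str.strIsdigit t
    · rw [pvCollect, if_pos hd, List.takeWhile_cons_of_pos hd,
        List.dropWhile_cons_of_pos hd, ih, pvJoinE_cons, String.append_assoc]
    · rw [pvCollect, if_neg hd, List.takeWhile_cons_of_neg hd,
        List.dropWhile_cons_of_neg hd, pvJoinE_nil_append]

theorem pvPartsA_nil : pvPartsA [] = [] := by rw [pvPartsA]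

theorem pvPartsA_cons (t : String) (rest : List String) :
    pvPartsA (t :: rest) =
      if PySem.Str.strIsdigit t then
        (pvCollect t rest).1 :: pvPartsA (pvCollect t rest).2
      else if t == "=" then pvPartsA rest
      else t :: pvPartsA rest := by
  rw [pvPartsA]

theorem pvRuns_nil : pvRuns [] = [] := by rw [pvRuns]

theorem pvRuns_cons (t : String) (rest : List String) :
    pvRuns (t :: rest) =
      (PySem.Str.strIsdigit t,
        t :: rest.takeWhile (fun u => PySem.Str.strIsdigit u == PySem.Str.strIsdigit t)) ::
      pvRuns (rest.dropWhile (fun u => PySem.Str.strIsdigit u == PySem.Str.strIsdigit t)) := by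
  rw [pvRuns]

-- A's scan over a block of non-digit tokens is an elementwise filter of '='
theorem pvPartsA_nondigit_block (run rest2 : List String)
    (h : ∀ u ∈ run, PySem.Str.strIsdigit u = false) :
    pvPartsA (run ++ rest2) = run.filter (fun u => u != "=") ++ pvPartsA rest2 := by
  induction run with
  | nil => simp
  | cons u run' ih =>
    have hu : PySem.Str.strIsdigit u = false := h u (by simp)
    have hrec := ih (fun v hv => h v (by simp [hv]))
    rw [List.cons_append, pvPartsA_cons, hu, List.filter_cons]
    by_cases he : (u == "=") = true
    · rw [if_pos he]
      simp only [Bool.false_eq_true, if_false, hrec, bne, he, Bool.not_true,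
        Bool.false_eq_true, if_false]
    · have he' : (u == "=") = false := by simpa using he
      rw [if_neg he]
      simp only [Bool.false_eq_true, if_false, hrec, bne, he', Bool.not_false, if_true,
        List.cons_append]

def pvPartsB (ts : List String) : List String :=
  (pvRuns ts).flatMap
    (fun r => if r.1 then [PySem.Str.join "" r.2] else r.2.filter (fun t => t != "="))

theorem pvParts_eq (ts : List String) : pvPartsA ts = pvPartsB ts := by
  match ts with
  | [] => rw [pvPartsA_nil, pvPartsB, pvRuns_nil, List.flatMap_nil]
  | t :: rest =>
    by_cases hd : PySem.Str.strIsdigit t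
    · -- digit run
      have hlen := List.length_dropWhile_le PySem.Str.strIsdigit rest
      have ihr := pvParts_eq (rest.dropWhile PySem.Str.strIsdigit)
      have key : (fun u => PySem.Str.strIsdigit u == PySem.Str.strIsdigit t)
          = PySem.Str.strIsdigit := by
        funext u; rw [hd]; cases PySem.Str.strIsdigit u <;> rfl
      rw [pvPartsA_cons, if_pos hd, pvCollect_eq, pvPartsB, pvRuns_cons, key,
        List.flatMap_cons, if_pos hd]
      rw [pvJoinE_cons, List.singleton_append, ihr, pvPartsB]
    · -- non-digit run
      have hd' : PySem.Str.strIsdigit t = false := by simpa using hd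
      have key : (fun u => PySem.Str.strIsdigit u == PySem.Str.strIsdigit t)
          = (fun u => !PySem.Str.strIsdigit u) := by
        funext u; rw [hd']; cases PySem.Str.strIsdigit u <;> rfl
      have hlen := List.length_dropWhile_le (fun u => !PySem.Str.strIsdigit u) rest
      have ihr := pvParts_eq (rest.dropWhile (fun u => !PySem.Str.strIsdigit u))
      have hall : ∀ u ∈ t :: rest.takeWhile (fun u => !PySem.Str.strIsdigit u),
          PySem.Str.strIsdigit u = false := by
        intro u hu
        rcases List.mem_cons.mp hu with h1 | h2
        · subst h1; exact hd'
        · simpa using List.mem_takeWhile_imp h2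
      have hsplit : t :: rest =
          (t :: rest.takeWhile (fun u => !PySem.Str.strIsdigit u)) ++
            rest.dropWhile (fun u => !PySem.Str.strIsdigit u) := by
        simp [List.takeWhile_append_dropWhile]
      calc pvPartsA (t :: rest)
          = (t :: rest.takeWhile (fun u => !PySem.Str.strIsdigit u)).filter (fun u => u != "=")
              ++ pvPartsA (rest.dropWhile (fun u => !PySem.Str.strIsdigit u)) := by
            rw [hsplit]
            exact pvPartsA_nondigit_block _ _ hall
        _ = pvPartsB (t :: rest) := by
            rw [pvPartsB, pvRuns_cons, key, hd', List.flatMap_cons]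
            rw [if_neg (by simp), ihr, pvPartsB]
termination_by ts.length
decreasing_by
  · simp only [List.length_cons]; omega
  · simp only [List.length_cons]; omega

theorem pvPopLead_eq (ps : List String) : pvPopLead ps = ps.dropWhile pvIsOp := by
  induction ps with
  | nil => simp [pvPopLead]
  | cons t rest ih =>
    by_cases h : pvIsOp t
    · rw [pvPopLead, if_pos h, List.dropWhile_cons_of_pos h, ih]
    · rw [pvPopLead, if_neg h, List.dropWhile_cons_of_neg h]

theorem pvPopTrail_concat (l : List String) (a : String) :
    pvPopTrail (l ++ [a]) = if pvIsOp a then pvPopTrail l else l ++ [a] := by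
  rw [pvPopTrail]
  split
  · rename_i t h
    rw [List.getLast?_concat] at h
    injection h with h
    subst h
    rw [List.dropLast_concat]
  · rename_i h
    rw [List.getLast?_concat] at h
    cases h

theorem pvPopTrail_eq (ps : List String) :
    pvPopTrail ps = (ps.reverse.dropWhile pvIsOp).reverse := by
  induction ps using List.reverseRecOn with
  | nil => rw [pvPopTrail]; simp
  | append_singleton l a ih =>
    rw [pvPopTrail_concat]
    by_cases h : pvIsOp a
    · rw [if_pos h, ih, List.reverse_append,
        List.reverse_cons, List.reverse_nil, List.nil_append, List.singleton_append,
        List.dropWhile_cons_of_pos h]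
    · rw [if_neg h, List.reverse_append, List.reverse_cons, List.reverse_nil,
        List.nil_append, List.singleton_append, List.dropWhile_cons_of_neg h,
        List.reverse_cons, List.reverse_reverse]

-- ===== VERDICT (by name: the statement is the Claim_ definition above) =====
theorem build_expr_spec : Claim_equal_build_expr := by
  intro preds _
  unfold Spec_build_expr build_expr build_expr_alt
  rw [pvParts_eq, pvPopLead_eq, pvPopTrail_eq, pvPartsB]
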